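-- pv_equiv track=rewrite | github.com/LiamLi1/algo_notebook | Algo/interview_problems/codes/variable_calculator.py | mapMutipleMap
-- ===== SOURCE A (Python) =====
-- def mapMutipleMap(map1, map2):
--     res = dict()
--     for k1, v1 in map1.items():
--         for k2, v2 in map2.items():
--             newKey = ''.join(sorted(k1 + k2))
--             if newKey not in res:
--                 res[newKey] = 0
--             res[newKey] += v1 * v2
--     return res
-- ===== SOURCE B (Python) =====
-- def mapMutipleMap(map1, map2):
--     def group(m):
--         g = {}
--         for k, v in m.items():
--             ck = ''.join(sorted(k))
--             g[ck] = g.get(ck, 0) + v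
--         return g
--     g1 = group(map1)
--     g2 = group(map2)
--     res = {}
--     for ck1, s1 in g1.items():
--         for ck2, s2 in g2.items():
--             nk = ''.join(sorted(ck1 + ck2))
--             res[nk] = res.get(nk, 0) + s1 * s2
--     return res
-- ===== Notes on version B (the rewrite author's own statement) =====
-- stated objective: faster
-- what changed: A runs the full n*m cross product over the raw entries, re-sorting each raw key pair and upserting into the result; B first collapses each input map into a grouped dictionary keyed by the canonical (sorted) form of each key with SUMMED values, then takes the cross product of the two reduced grouped maps only - correct because the result key depends only on each key's character multiset and a sum of products equals the product of group sums.
import Mathlib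
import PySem

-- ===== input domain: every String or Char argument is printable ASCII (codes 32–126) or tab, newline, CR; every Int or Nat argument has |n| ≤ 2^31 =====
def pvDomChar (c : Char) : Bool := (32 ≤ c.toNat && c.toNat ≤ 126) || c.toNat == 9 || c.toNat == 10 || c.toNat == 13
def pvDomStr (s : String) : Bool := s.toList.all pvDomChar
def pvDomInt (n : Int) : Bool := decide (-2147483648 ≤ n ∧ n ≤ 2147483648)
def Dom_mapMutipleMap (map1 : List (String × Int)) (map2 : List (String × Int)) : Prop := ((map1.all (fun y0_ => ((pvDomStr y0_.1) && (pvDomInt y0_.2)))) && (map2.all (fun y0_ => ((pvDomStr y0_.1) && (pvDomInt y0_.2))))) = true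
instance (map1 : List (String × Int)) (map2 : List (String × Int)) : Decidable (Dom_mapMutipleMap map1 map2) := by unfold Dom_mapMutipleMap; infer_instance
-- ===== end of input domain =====

-- B replaces A's full cross product over the raw entries by a group-then-multiply scheme:
-- each input map is first collapsed into a grouped dict keyed by the canonical (sorted) key
-- with summed values, and only the two reduced grouped maps are crossed.

-- ''.join(sorted(s)) — key canonicalisation, used verbatim by both Pythons
def pvCanon (s : String) : String := String.ofList (PySem.List.sorted s.toList (fun c => c) false)

-- ===== PORT A =====
def mapMutipleMap (map1 : List (String × Int)) (map2 : List (String × Int)) : List (String × Int) :=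
  (map1.foldl (fun res p1 =>
      map2.foldl (fun res p2 =>
        let newKey := pvCanon (p1.1 ++ p2.1)
        let res := if res.contains newKey then res else res.insert newKey 0
        res.insert newKey (res.getD newKey 0 + p1.2 * p2.2)) res)
    PySem.Dict.empty).items

-- ===== PORT B =====
-- helper 'group': g[ck] = g.get(ck, 0) + v over the entries of m
def pvGroup (m : List (String × Int)) : PySem.Dict String Int :=
  m.foldl (fun g p => g.insert (pvCanon p.1) (g.getD (pvCanon p.1) 0 + p.2)) PySem.Dict.empty

def mapMutipleMap_alt (map1 : List (String × Int)) (map2 : List (String × Int)) : List (String × Int) :=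
  let g1 := pvGroup map1
  let g2 := pvGroup map2
  (g1.items.foldl (fun res p1 =>
      g2.items.foldl (fun res p2 =>
        let nk := pvCanon (p1.1 ++ p2.1)
        res.insert nk (res.getD nk 0 + p1.2 * p2.2)) res)
    PySem.Dict.empty).items

-- ===== PRECONDITION & SPEC =====
def Spec_mapMutipleMap (map1 : List (String × Int)) (map2 : List (String × Int)) (out : List (String × Int)) : Prop := out = mapMutipleMap_alt map1 map2
instance (map1 : List (String × Int)) (map2 : List (String × Int)) (out : List (String × Int)) : Decidable (Spec_mapMutipleMap map1 map2 out) := by unfold Spec_mapMutipleMap; infer_instance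

-- ===== CLAIM (what is proved, stated in full; the proofs are below) =====
def Claim_equal_mapMutipleMap : Prop := ∀ (map1 : List (String × Int)) (map2 : List (String × Int)), Dom_mapMutipleMap map1 map2 → Spec_mapMutipleMap map1 map2 (mapMutipleMap map1 map2)

-- ===== LEMMAS AND PROOFS =====

-- canonicalised entry lists and the flat contribution list of a cross product
def pvEnt (m : List (String × Int)) : List (String × Int) := m.map (fun p => (pvCanon p.1, p.2))
def pvProd (X Y : List (String × Int)) : List (String × Int) :=
  X.flatMap (fun x => Y.map (fun y => (pvCanon (x.1 ++ y.1), x.2 * y.2)))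
def pvCross (K1 K2 : List String) : List String :=
  K1.flatMap (fun a => K2.map (fun b => pvCanon (a ++ b)))

-- sum of the values carried by key k in a contribution list
def pvSumAt (L : List (String × Int)) (k : String) : Int :=
  ((L.filter (fun q => q.1 == k)).map Prod.snd).sum

-- the per-key fold of a contribution list under an arbitrary "upsert" combine
def pvFold {ν : Type} (comb : ν → Int → ν) (dflt : ν) (qs : List (String × Int)) (k : String) : ν :=
  (qs.filter (fun q => q.1 == k)).foldl (fun a q => comb a q.2) dflt

theorem pvFold_snoc {ν : Type} (comb : ν → Int → ν) (dflt : ν)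
    (qs : List (String × Int)) (q : String × Int) (k : String) :
    pvFold comb dflt (qs ++ [q]) k =
      if q.1 = k then comb (pvFold comb dflt qs k) q.2 else pvFold comb dflt qs k := by
  unfold pvFold
  rw [List.filter_append, List.foldl_append]
  by_cases h : q.1 = k
  · simp [h]
  · simp [h]

theorem pvFold_of_not_mem {ν : Type} (comb : ν → Int → ν) (dflt : ν)
    (qs : List (String × Int)) (k : String)
    (h : k ∉ qs.map Prod.fst) : pvFold comb dflt qs k = dflt := by
  unfold pvFold
  rw [List.filter_eq_nil_iff.mpr ?_]
  · rfl
  · intro q hq hbeq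
    exact h (List.mem_map.mpr ⟨q, hq, eq_of_beq hbeq⟩)

theorem pv_dedup_snoc (xs : List String) (x : String) :
    PySem.List.dedup (xs ++ [x]) =
      if x ∈ xs then PySem.List.dedup xs else PySem.List.dedup xs ++ [x] := by
  have hmem : PySem.Set.contains (PySem.List.dedup xs) x = true ↔ x ∈ xs := by
    rw [show (PySem.Set.contains (PySem.List.dedup xs) x = true) ↔ x ∈ PySem.List.dedup xs by
          simp [PySem.Set.contains]]
    exact PySem.List.mem_dedup xs x
  show List.foldl PySem.Set.add PySem.Set.empty (xs ++ [x]) = _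
  rw [List.foldl_append, List.foldl_cons, List.foldl_nil]
  show PySem.Set.add (PySem.List.dedup xs) x = _
  unfold PySem.Set.add
  by_cases h : x ∈ xs
  · rw [if_pos (hmem.mpr h), if_pos h]
  · rw [if_neg (fun hc => h (hmem.mp hc)), if_neg h]

theorem pv_find?_map_keys {ν : Type} (K : List String) (S : String → ν) (k : String) (h : k ∈ K) :
    (List.find? (fun p => p.1 == k) (K.map (fun k' => (k', S k')))) = some (k, S k) := by
  induction K with
  | nil => cases h
  | cons a K ih =>
    by_cases hak : a = k
    · subst hak
      rw [List.map_cons, List.find?_cons_of_pos (by simp)]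
    · have hk : k ∈ K := by
        rcases List.mem_cons.mp h with h' | h'
        · exact absurd h'.symm hak
        · exact h'
      rw [List.map_cons, List.find?_cons_of_neg (by simp [hak]), ih hk]

theorem pv_contains_mk_map {ν : Type} (K : List String) (S : String → ν) (k : String) :
    (PySem.Dict.mk (K.map (fun k' => (k', S k')))).contains k = true ↔ k ∈ K := by
  simp [PySem.Dict.contains, List.any_map, Function.comp, List.any_eq_true]

-- the main invariant: upsert-accumulating a contribution list gives the keys in
-- first-occurrence order, each carrying the fold of its own contributions
theorem pv_foldl_upsert_items {ν : Type} (comb : ν → Int → ν) (dflt : ν)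
    (qs : List (String × Int)) :
    (qs.foldl (fun d q => d.insert q.1 (comb (d.getD q.1 dflt) q.2)) PySem.Dict.empty).items =
      (PySem.List.dedup (qs.map Prod.fst)).map (fun k => (k, pvFold comb dflt qs k)) := by
  induction qs using List.reverseRecOn with
  | nil => rfl
  | append_singleton qs q ih =>
    rw [List.foldl_append, List.foldl_cons, List.foldl_nil]
    rw [List.map_append]
    simp only [List.map_cons, List.map_nil]
    rw [pv_dedup_snoc]
    set K := PySem.List.dedup (qs.map Prod.fst) with hK
    set F := pvFold comb dflt qs with hF
    have hD : qs.foldl (fun d q => d.insert q.1 (comb (d.getD q.1 dflt) q.2)) PySem.Dict.empty =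
        PySem.Dict.mk (K.map (fun k => (k, F k))) := by
      cases hd : qs.foldl (fun d q => d.insert q.1 (comb (d.getD q.1 dflt) q.2)) PySem.Dict.empty with
      | mk items =>
        have := hd ▸ ih
        simpa using this
    rw [hD]
    have hKmem : q.1 ∈ K ↔ q.1 ∈ qs.map Prod.fst := PySem.List.mem_dedup _ _
    by_cases h : q.1 ∈ qs.map Prod.fst
    · -- key already present: overwrite in place
      rw [if_pos h]
      have hc : (PySem.Dict.mk (K.map (fun k => (k, F k)))).contains q.1 = true :=
        (pv_contains_mk_map K _ q.1).mpr (hKmem.mpr h)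
      have hget : (PySem.Dict.mk (K.map (fun k => (k, F k)))).getD q.1 dflt = F q.1 := by
        simp [PySem.Dict.getD, PySem.Dict.get?,
          pv_find?_map_keys K F q.1 (hKmem.mpr h)]
      rw [hget, PySem.Dict.items_insert_of_contains _ _ hc, List.map_map]
      apply List.map_congr_left
      intro k _
      by_cases hk : k = q.1
      · subst hk; simp [pvFold_snoc, hF]
      · have h2 : ((k : String) == q.1) = false := by simp [hk]
        simp [pvFold_snoc, hk, hF, Ne.symm hk]
    · -- new key: the pair is appended at the end
      rw [if_neg h]
      have hc : (PySem.Dict.mk (K.map (fun k => (k, F k)))).contains q.1 = false := by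
        rw [Bool.eq_false_iff]
        intro hc'
        exact h (hKmem.mp ((pv_contains_mk_map K _ q.1).mp hc'))
      have hnone : List.find? (fun p => p.1 == q.1) (K.map (fun k => (k, F k))) = none := by
        rw [List.find?_eq_none]
        intro p hp hb
        rcases List.mem_map.mp hp with ⟨k, hkK, rfl⟩
        exact h (hKmem.mp (eq_of_beq hb ▸ hkK))
      have hget : (PySem.Dict.mk (K.map (fun k => (k, F k)))).getD q.1 dflt = dflt := by
        simp [PySem.Dict.getD, PySem.Dict.get?, hnone]
      rw [hget, PySem.Dict.items_insert_of_not_contains _ _ hc]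
      simp only [List.map_append, List.map_cons, List.map_nil]
      congr 1
      · apply List.map_congr_left
        intro k hkK
        have hkq : k ≠ q.1 := fun e => h (hKmem.mp (e ▸ hkK))
        simp [pvFold_snoc, hF, Ne.symm hkq]
      · have h0 : F q.1 = dflt := pvFold_of_not_mem comb dflt qs q.1 h
        simp [pvFold_snoc, h0, ← hF]

-- A's loop body (membership test, init to 0, +=) is one (+)-upsert of the contribution (k, v)
theorem pv_stepA_eq (d : PySem.Dict String Int) (k : String) (v : Int) :
    ((if d.contains k then d else d.insert k 0).insert k
        ((if d.contains k then d else d.insert k 0).getD k 0 + v)) =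
      d.insert k (d.getD k 0 + v) := by
  by_cases hc : d.contains k = true
  · simp [hc]
  · have hc' : d.contains k = false := by rwa [Bool.not_eq_true] at hc
    have hnone : List.find? (fun p => p.1 == k) d.items = none := by
      rw [List.find?_eq_none]
      intro p hp hb
      have : d.items.any (fun p => p.1 == k) = true := List.any_eq_true.mpr ⟨p, hp, hb⟩
      rw [show d.items.any (fun p => p.1 == k) = d.contains k from rfl, hc'] at this
      cases this
    have hins : d.insert k 0 = PySem.Dict.mk (d.items ++ [(k, 0)]) := by
      unfold PySem.Dict.insert
      rw [if_neg (by simp [hc'])]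
    simp only [hc', Bool.false_eq_true, if_false, hins]
    have hget0 : (PySem.Dict.mk (d.items ++ [(k, 0)])).getD k 0 = 0 := by
      simp [PySem.Dict.getD, PySem.Dict.get?, List.find?_append, hnone]
    have hgetd : d.getD k 0 = 0 := by
      simp [PySem.Dict.getD, PySem.Dict.get?, hnone]
    have hc2 : (PySem.Dict.mk (d.items ++ [(k, 0)])).contains k = true := by
      simp [PySem.Dict.contains]
    unfold PySem.Dict.insert
    rw [if_pos hc2, if_neg (by simp [hc'])]
    congr 1
    rw [hget0, hgetd, List.map_append]
    have hid : (d.items).map (fun p => if (p.1 == k) = true then (k, 0 + v) else p) = d.items := by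
      refine (List.map_congr_left ?_).trans (List.map_id d.items)
      intro p hp
      rw [if_neg ?_]
      · rfl
      intro hb
      have : d.items.any (fun p => p.1 == k) = true := List.any_eq_true.mpr ⟨p, hp, hb⟩
      rw [show d.items.any (fun p => p.1 == k) = d.contains k from rfl, hc'] at this
      cases this
    rw [hid]
    simp

-- bridge: A's nested loops are the (+)-upsert fold over the flat contribution list
theorem pv_A_as_fold (map1 map2 : List (String × Int)) :
    mapMutipleMap map1 map2 =
      ((map1.flatMap (fun p1 => map2.map (fun p2 => (pvCanon (p1.1 ++ p2.1), p1.2 * p2.2)))).foldl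
        (fun d q => d.insert q.1 (d.getD q.1 0 + q.2)) PySem.Dict.empty).items := by
  unfold mapMutipleMap
  rw [List.foldl_flatMap]
  simp only [List.foldl_map, pv_stepA_eq]

-- B's nested loops over the grouped items are the same (+)-upsert fold over pvProd g1 g2
theorem pv_B_as_fold (map1 map2 : List (String × Int)) :
    mapMutipleMap_alt map1 map2 =
      ((pvProd (pvGroup map1).items (pvGroup map2).items).foldl
        (fun d q => d.insert q.1 (d.getD q.1 0 + q.2)) PySem.Dict.empty).items := by
  unfold mapMutipleMap_alt pvProd
  rw [List.foldl_flatMap]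
  simp only [List.foldl_map]

-- ===== the canonical-key algebra =====

theorem pvCanon_append (a b : String) :
    pvCanon (a ++ b) = pvCanon (pvCanon a ++ pvCanon b) := by
  unfold pvCanon
  congr 1
  apply PySem.List.sorted_eq_sorted_of_perm _ _ (fun c => c) (fun _ _ h => h)
  rw [String.toList_append, String.toList_append]
  have ha : (String.ofList (PySem.List.sorted a.toList (fun c => c) false)).toList =
      PySem.List.sorted a.toList (fun c => c) false := by simp
  have hb : (String.ofList (PySem.List.sorted b.toList (fun c => c) false)).toList =
      PySem.List.sorted b.toList (fun c => c) false := by simp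
  rw [ha, hb]
  exact (List.Perm.append (PySem.List.sorted_perm _ _ false) (PySem.List.sorted_perm _ _ false)).symm

-- A's flat contribution list is pvProd of the canonicalised entry lists
theorem pv_LA_eq (map1 map2 : List (String × Int)) :
    (map1.flatMap (fun p1 => map2.map (fun p2 => (pvCanon (p1.1 ++ p2.1), p1.2 * p2.2)))) =
      pvProd (pvEnt map1) (pvEnt map2) := by
  unfold pvProd pvEnt
  rw [List.flatMap_map]
  have hfun : (fun p1 : String × Int =>
      map2.map fun p2 => (pvCanon (p1.1 ++ p2.1), p1.2 * p2.2)) =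
      ((fun x : String × Int => (map2.map (fun p => (pvCanon p.1, p.2))).map
          (fun y => (pvCanon (x.1 ++ y.1), x.2 * y.2))) ∘ (fun p => (pvCanon p.1, p.2))) := by
    funext p1
    simp only [Function.comp_def]
    rw [List.map_map]
    apply List.map_congr_left
    intro p2 _
    simp only [Function.comp_def]
    rw [pvCanon_append]
  rw [hfun]
  simp only [Function.comp_def]

-- ===== dedup / Set.add foldl toolbox =====

theorem pv_add_of_mem (s : List String) (x : String) (h : x ∈ s) :
    PySem.Set.add s x = s := by
  unfold PySem.Set.add
  rw [if_pos]
  simpa [PySem.Set.contains] using h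

theorem pv_add_of_not_mem (s : List String) (x : String) (h : x ∉ s) :
    PySem.Set.add s x = s ++ [x] := by
  unfold PySem.Set.add
  rw [if_neg]
  intro hc
  exact h (by simpa [PySem.Set.contains] using hc)

theorem pv_addF_split (ys s t : List String) :
    List.foldl PySem.Set.add (s ++ t) ys =
      s ++ List.foldl PySem.Set.add t (ys.filter (fun y => !s.contains y)) := by
  induction ys generalizing t with
  | nil => simp
  | cons y ys ih =>
    rw [List.foldl_cons]
    by_cases hys : y ∈ s
    · rw [pv_add_of_mem _ _ (List.mem_append_left _ hys),
          List.filter_cons_of_neg (by simp [hys])]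
      exact ih t
    · by_cases hyt : y ∈ t
      · rw [pv_add_of_mem _ _ (List.mem_append_right _ hyt),
            List.filter_cons_of_pos (by simp [hys]), List.foldl_cons,
            pv_add_of_mem _ _ hyt]
        exact ih t
      · have hnm : y ∉ s ++ t := by
          intro hm
          rcases List.mem_append.mp hm with h' | h' <;> [exact hys h'; exact hyt h']
        rw [pv_add_of_not_mem _ _ hnm, List.append_assoc,
            List.filter_cons_of_pos (by simp [hys]), List.foldl_cons,
            pv_add_of_not_mem _ _ hyt]
        exact ih (t ++ [y])

theorem pv_addF_formula (ys s : List String) :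
    List.foldl PySem.Set.add s ys =
      s ++ PySem.List.dedup (ys.filter (fun y => !s.contains y)) := by
  have h := pv_addF_split ys s []
  rw [List.append_nil] at h
  rw [h]
  congr 1

theorem pv_mem_addF_left (ys s : List String) (x : String) (h : x ∈ s) :
    x ∈ List.foldl PySem.Set.add s ys := by
  rw [pv_addF_formula]
  exact List.mem_append_left _ h

theorem pv_mem_addF_of_mem (ys s : List String) (x : String) (h : x ∈ ys) :
    x ∈ List.foldl PySem.Set.add s ys := by
  by_cases hs : x ∈ s
  · exact pv_mem_addF_left ys s x hs
  · rw [pv_addF_formula]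
    refine List.mem_append_right _ ?_
    rw [PySem.List.mem_dedup]
    refine List.mem_filter.mpr ⟨h, ?_⟩
    simpa using hs

theorem pv_addF_of_subset (ys s : List String) (h : ∀ y ∈ ys, y ∈ s) :
    List.foldl PySem.Set.add s ys = s := by
  rw [pv_addF_formula]
  have : ys.filter (fun y => !s.contains y) = [] := by
    rw [List.filter_eq_nil_iff]
    intro y hy
    simpa using h y hy
  rw [this]
  simp [PySem.List.dedup_eq_ofList]

theorem pv_dedup_cons (a : String) (l : List String) :
    PySem.List.dedup (a :: l) = a :: PySem.List.dedup (l.filter (fun y => y != a)) := by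
  rw [PySem.List.dedup_eq_ofList, PySem.Set.ofList_eq_foldl, List.foldl_cons]
  have h0 : PySem.Set.add [] a = [a] := pv_add_of_not_mem [] a (by simp)
  rw [h0]
  have h := pv_addF_split l [a] []
  rw [List.append_nil] at h
  rw [h]
  have hfil : l.filter (fun y => ! ([a].contains y)) = l.filter (fun y => y != a) := by
    apply List.filter_congr
    intro y _
    by_cases hya : y = a <;> simp [hya, bne]
  rw [hfil]
  rw [PySem.List.dedup_eq_ofList, PySem.Set.ofList_eq_foldl]
  rfl

theorem pv_filter_dedup (p : String → Bool) (l : List String) :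
    (PySem.List.dedup l).filter p = PySem.List.dedup (l.filter p) := by
  have main : ∀ (n : Nat) (l : List String), l.length ≤ n →
      (PySem.List.dedup l).filter p = PySem.List.dedup (l.filter p) := by
    intro n
    induction n with
    | zero =>
      intro l h
      rw [List.length_eq_zero_iff.mp (Nat.le_zero.mp h)]
      rfl
    | succ n ih =>
      intro l h
      match l with
      | [] => rfl
      | a :: l' =>
        rw [pv_dedup_cons, List.filter_cons, List.filter_cons]
        have hlen : (l'.filter (fun y => y != a)).length ≤ n :=
          le_trans (List.length_filter_le _ _) (Nat.le_of_succ_le_succ h)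
        have hcomm : (l'.filter (fun y => y != a)).filter p =
            (l'.filter p).filter (fun y => y != a) := by
          rw [List.filter_filter, List.filter_filter]
          apply List.filter_congr
          intro y _
          rw [Bool.and_comm]
        by_cases hp : p a
        · rw [if_pos hp, if_pos hp, ih _ hlen, hcomm, pv_dedup_cons]
        · have hp' : p a = false := by simpa using hp
          rw [if_neg (by simp [hp']), if_neg (by simp [hp']), ih _ hlen, hcomm]
          congr 1
          rw [List.filter_eq_self]
          intro y hy
          have hpy : p y = true := (List.mem_filter.mp hy).2
          have : y ≠ a := by
            intro e
            rw [e, hp'] at hpy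
            cases hpy
          simpa using this
  exact main l.length l le_rfl

theorem pv_dedup_cons' (a : String) (l : List String) :
    PySem.List.dedup (a :: l) = a :: (PySem.List.dedup l).filter (fun y => y != a) := by
  rw [pv_dedup_cons, pv_filter_dedup]

-- skipping already-covered elements of a mapped list does not change the Set fold
theorem pv_skip_elems {α : Type} (zs : List α) (g : α → String) (p : α → Bool) (s : List String)
    (h : ∀ z ∈ zs, p z = false → g z ∈ s) :
    List.foldl PySem.Set.add s (zs.map g) =
      List.foldl PySem.Set.add s ((zs.filter p).map g) := by
  induction zs generalizing s with
  | nil => rfl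
  | cons z zs ih =>
    rw [List.map_cons, List.foldl_cons, List.filter_cons]
    by_cases hp : p z
    · rw [if_pos hp, List.map_cons, List.foldl_cons]
      apply ih
      intro z' hz' hpz'
      have hmem : g z' ∈ s := h z' (List.mem_cons_of_mem _ hz') hpz'
      exact (PySem.Set.mem_add _ _ _).mpr (Or.inl hmem)
    · have hp' : p z = false := by simpa using hp
      rw [if_neg (by simp [hp'])]
      rw [pv_add_of_mem _ _ (h z List.mem_cons_self hp')]
      apply ih
      intro z' hz' hpz'
      exact h z' (List.mem_cons_of_mem _ hz') hpz'

theorem pv_map_dedup_addF (ys : List String) (g : String → String) (s : List String) :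
    List.foldl PySem.Set.add s (ys.map g) =
      List.foldl PySem.Set.add s ((PySem.List.dedup ys).map g) := by
  induction ys generalizing s with
  | nil => rfl
  | cons b ys ih =>
    rw [List.map_cons, List.foldl_cons, ih, pv_dedup_cons', List.map_cons, List.foldl_cons]
    apply pv_skip_elems
    intro z hz hpz
    have hzb : z = b := by simpa using hpz
    rw [hzb]
    exact (PySem.Set.mem_add _ _ _).mpr (Or.inr rfl)

-- skipping rows whose contributions are already present does not change the Set fold
theorem pv_skip_rows (K2 : List String) (K1 : List String) (p : String → Bool) (s : List String)
    (h : ∀ a ∈ K1, p a = false → ∀ y ∈ K2.map (fun b => pvCanon (a ++ b)), y ∈ s) :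
    List.foldl PySem.Set.add s (pvCross K1 K2) =
      List.foldl PySem.Set.add s (pvCross (K1.filter p) K2) := by
  induction K1 generalizing s with
  | nil => rfl
  | cons a K1 ih =>
    rw [List.filter_cons]
    unfold pvCross
    rw [List.flatMap_cons, List.foldl_append]
    by_cases hp : p a
    · rw [if_pos hp, List.flatMap_cons, List.foldl_append]
      apply ih
      intro a' ha' hpa' y hy
      exact pv_mem_addF_left _ _ _ (h a' (List.mem_cons_of_mem _ ha') hpa' y hy)
    · have hp' : p a = false := by simpa using hp
      rw [if_neg (by simp [hp'])]
      rw [pv_addF_of_subset _ _ (h a List.mem_cons_self hp')]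
      apply ih
      intro a' ha' hpa'
      exact h a' (List.mem_cons_of_mem _ ha') hpa'

theorem pv_rows_dedup (K1 K2 : List String) (s : List String) :
    List.foldl PySem.Set.add s (pvCross K1 K2) =
      List.foldl PySem.Set.add s (pvCross (PySem.List.dedup K1) K2) := by
  induction K1 generalizing s with
  | nil => rfl
  | cons a K1 ih =>
    rw [pv_dedup_cons']
    unfold pvCross
    rw [List.flatMap_cons, List.flatMap_cons, List.foldl_append, List.foldl_append]
    rw [show (K1.flatMap fun a => K2.map fun b => pvCanon (a ++ b)) = pvCross K1 K2 from rfl]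
    rw [ih]
    refine pv_skip_rows K2 (PySem.List.dedup K1) (fun y => y != a) _ ?_
    intro a' ha' hpa' y hy
    have haa : a' = a := by simpa using hpa'
    rw [haa] at hy
    exact pv_mem_addF_of_mem _ _ _ hy

theorem pv_cols_dedup (K1 K2 : List String) (s : List String) :
    List.foldl PySem.Set.add s (pvCross K1 K2) =
      List.foldl PySem.Set.add s (pvCross K1 (PySem.List.dedup K2)) := by
  unfold pvCross
  rw [List.foldl_flatMap, List.foldl_flatMap]
  have hstep : (fun (acc : List String) (a : String) =>
      List.foldl PySem.Set.add acc (K2.map fun b => pvCanon (a ++ b))) =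
      (fun acc a =>
      List.foldl PySem.Set.add acc ((PySem.List.dedup K2).map fun b => pvCanon (a ++ b))) := by
    funext acc a
    exact pv_map_dedup_addF K2 (fun b => pvCanon (a ++ b)) acc
  rw [hstep]

-- first-occurrence key order of the cross product survives deduplication of both sides
theorem pv_keys_eq (K1 K2 : List String) :
    PySem.List.dedup (pvCross K1 K2) =
      PySem.List.dedup (pvCross (PySem.List.dedup K1) (PySem.List.dedup K2)) := by
  rw [PySem.List.dedup_eq_ofList, PySem.Set.ofList_eq_foldl,
      PySem.List.dedup_eq_ofList (pvCross _ _), PySem.Set.ofList_eq_foldl]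
  rw [pv_rows_dedup, pv_cols_dedup]

-- ===== sum toolbox =====

theorem pv_foldl_add_eq_sum (l : List (String × Int)) (c : Int) :
    l.foldl (fun a q => a + q.2) c = c + (l.map Prod.snd).sum := by
  induction l generalizing c with
  | nil => simp
  | cons q l ih =>
    rw [List.foldl_cons, ih, List.map_cons, List.sum_cons]
    ring

theorem pv_pvFold_eq_sumAt (qs : List (String × Int)) (k : String) :
    pvFold (fun s v => s + v) 0 qs k = pvSumAt qs k := by
  unfold pvFold pvSumAt
  rw [pv_foldl_add_eq_sum]
  ring

theorem pv_sum_map_add {α : Type} (M : List α) (u v : α → Int) :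
    (M.map (fun x => u x + v x)).sum = (M.map u).sum + (M.map v).sum := by
  induction M with
  | nil => simp
  | cons x M ih =>
    simp only [List.map_cons, List.sum_cons, ih]
    ring

theorem pv_sum_swap {α β : Type} (L : List α) (M : List β) (g : α → β → Int) :
    (L.map (fun c => (M.map (g c)).sum)).sum = (M.map (fun x => (L.map (fun c => g c x)).sum)).sum := by
  induction L with
  | nil => simp
  | cons c L ih =>
    simp only [List.map_cons, List.sum_cons, ih, pv_sum_map_add]

theorem pv_sum_ite_nodup (D : List String) (a : String) (w : Int)
    (hn : D.Nodup) (hm : a ∈ D) :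
    (D.map (fun c => if a = c then w else 0)).sum = w := by
  induction D with
  | nil => cases hm
  | cons c D ih =>
    rw [List.map_cons, List.sum_cons]
    rcases List.nodup_cons.mp hn with ⟨hcD, hnD⟩
    by_cases hac : a = c
    · rw [if_pos hac]
      have hzero : (D.map (fun c => if a = c then w else 0)).sum = 0 := by
        have : D.map (fun c => if a = c then w else 0) = D.map (fun _ => (0 : Int)) := by
          apply List.map_congr_left
          intro d hd
          rw [if_neg]
          intro e
          exact hcD (by rwa [← e, hac] at hd)
        rw [this]
        simp
      rw [hzero]
      ring
    · rw [if_neg hac]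
      have ham : a ∈ D := by
        rcases List.mem_cons.mp hm with h' | h'
        · exact absurd h' hac
        · exact h'
      rw [ih hnD ham]
      ring

theorem pv_sum_ite_filter {α : Type} (l : List α) (p : α → Bool) (g : α → Int) :
    (l.map (fun x => if p x then g x else 0)).sum = ((l.filter p).map g).sum := by
  induction l with
  | nil => simp
  | cons x l ih =>
    rw [List.map_cons, List.sum_cons, List.filter_cons]
    by_cases hp : p x
    · rw [if_pos hp, if_pos hp, List.map_cons, List.sum_cons, ih]
    · have hp' : p x = false := by simpa using hp
      rw [if_neg (by simp [hp']), if_neg (by simp [hp']), ih]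
      ring

theorem pv_sum_map_mul_left {α : Type} (l : List α) (g : α → Int) (c : Int) :
    (l.map (fun x => c * g x)).sum = c * (l.map g).sum := by
  induction l with
  | nil => simp
  | cons x l ih =>
    simp only [List.map_cons, List.sum_cons, ih]
    ring

-- the group-by lemma: a weighted sum over entries equals the weighted sum over grouped sums
theorem pv_group_by (E : List (String × Int)) (T : String → Int) :
    (E.map (fun x => x.2 * T x.1)).sum =
      ((PySem.List.dedup (E.map Prod.fst)).map (fun c => pvSumAt E c * T c)).sum := by
  have step1 : ∀ c : String, pvSumAt E c * T c =
      (E.map (fun x => if x.1 = c then x.2 * T x.1 else 0)).sum := by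
    intro c
    rw [show (fun x : String × Int => if x.1 = c then x.2 * T x.1 else 0) =
        (fun x : String × Int => if (fun q : String × Int => q.1 == c) x then
          (fun q : String × Int => q.2 * T q.1) x else 0) from by
      funext x
      by_cases hx : x.1 = c <;> simp [hx]]
    rw [pv_sum_ite_filter]
    have : ((E.filter (fun q => q.1 == c)).map (fun q => q.2 * T q.1)).sum =
        ((E.filter (fun q => q.1 == c)).map (fun q => T c * q.2)).sum := by
      congr 1
      apply List.map_congr_left
      intro q hq
      have : q.1 = c := by simpa using (List.mem_filter.mp hq).2
      rw [this]
      ring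
    rw [this, pv_sum_map_mul_left]
    unfold pvSumAt
    ring
  have step2 : ((PySem.List.dedup (E.map Prod.fst)).map (fun c => pvSumAt E c * T c)).sum =
      ((PySem.List.dedup (E.map Prod.fst)).map
        (fun c => (E.map (fun x => if x.1 = c then x.2 * T x.1 else 0)).sum)).sum := by
    congr 1
    apply List.map_congr_left
    intro c _
    exact step1 c
  rw [step2, pv_sum_swap]
  congr 1
  apply List.map_congr_left
  intro x hx
  have hmem : x.1 ∈ PySem.List.dedup (E.map Prod.fst) :=
    (PySem.List.mem_dedup _ _).mpr (List.mem_map.mpr ⟨x, hx, rfl⟩)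
  have hnodup : (PySem.List.dedup (E.map Prod.fst)).Nodup := PySem.List.nodup_dedup _
  exact (pv_sum_ite_nodup (PySem.List.dedup (E.map Prod.fst)) x.1 (x.2 * T x.1) hnodup hmem).symm

theorem pv_sumAt_append (L M : List (String × Int)) (k : String) :
    pvSumAt (L ++ M) k = pvSumAt L k + pvSumAt M k := by
  unfold pvSumAt
  rw [List.filter_append, List.map_append, List.sum_append]

theorem pv_row_sum (x1 : String) (xv : Int) (Y : List (String × Int)) (k : String) :
    pvSumAt (Y.map (fun y => (pvCanon (x1 ++ y.1), xv * y.2))) k =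
      xv * (Y.map (fun y => if pvCanon (x1 ++ y.1) = k then y.2 else 0)).sum := by
  induction Y with
  | nil => simp [pvSumAt]
  | cons y Y ih =>
    unfold pvSumAt at ih ⊢
    rw [List.map_cons, List.filter_cons]
    by_cases hc : pvCanon (x1 ++ y.1) = k
    · rw [if_pos (by simpa using hc), List.map_cons, List.sum_cons, ih,
          List.map_cons, List.sum_cons, if_pos hc]
      ring
    · rw [if_neg (by simpa using hc), ih, List.map_cons, List.sum_cons, if_neg hc]
      ring

-- the per-key sum of the cross product as a nested weighted sum
theorem pv_prod_sum (X Y : List (String × Int)) (k : String) :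
    pvSumAt (pvProd X Y) k =
      (X.map (fun x => x.2 * (Y.map (fun y => if pvCanon (x.1 ++ y.1) = k then y.2 else 0)).sum)).sum := by
  induction X with
  | nil => simp [pvProd, pvSumAt]
  | cons x X ih =>
    unfold pvProd
    rw [List.flatMap_cons,
        show (X.flatMap fun x => Y.map fun y => (pvCanon (x.1 ++ y.1), x.2 * y.2)) =
          pvProd X Y from rfl,
        pv_sumAt_append, pv_row_sum, ih, List.map_cons, List.sum_cons]

-- grouping the items of pvGroup
theorem pv_group_items (m : List (String × Int)) :
    (pvGroup m).items =
      (PySem.List.dedup ((pvEnt m).map Prod.fst)).map (fun c => (c, pvSumAt (pvEnt m) c)) := by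
  unfold pvGroup
  have hfold : m.foldl (fun g p => g.insert (pvCanon p.1) (g.getD (pvCanon p.1) 0 + p.2))
      PySem.Dict.empty =
      (pvEnt m).foldl (fun g q => g.insert q.1 (g.getD q.1 0 + q.2)) PySem.Dict.empty := by
    unfold pvEnt
    rw [List.foldl_map]
  rw [hfold, pv_foldl_upsert_items]
  apply List.map_congr_left
  intro c _
  rw [pv_pvFold_eq_sumAt]

-- per-key value agreement between the raw product and the grouped product
theorem pv_values_eq (map1 map2 : List (String × Int)) (k : String) :
    pvSumAt (pvProd (pvEnt map1) (pvEnt map2)) k =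
      pvSumAt (pvProd (pvGroup map1).items (pvGroup map2).items) k := by
  rw [pv_prod_sum, pv_prod_sum, pv_group_items, pv_group_items, List.map_map]
  have hTeq : ∀ c : String,
      ((pvEnt map2).map (fun y => if pvCanon (c ++ y.1) = k then y.2 else 0)).sum =
      (((PySem.List.dedup ((pvEnt map2).map Prod.fst)).map
          (fun c2 => (c2, pvSumAt (pvEnt map2) c2))).map
        (fun y => if pvCanon (c ++ y.1) = k then y.2 else 0)).sum := by
    intro c
    have h1 : (pvEnt map2).map (fun y => if pvCanon (c ++ y.1) = k then y.2 else 0) =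
        (pvEnt map2).map (fun y => y.2 * (if pvCanon (c ++ y.1) = k then 1 else 0)) := by
      apply List.map_congr_left
      intro y _
      by_cases hc : pvCanon (c ++ y.1) = k <;> simp [hc]
    rw [h1, pv_group_by (pvEnt map2) (fun b => if pvCanon (c ++ b) = k then 1 else 0),
        List.map_map]
    congr 1
    apply List.map_congr_left
    intro c2 _
    simp only [Function.comp]
    by_cases hc : pvCanon (c ++ c2) = k <;> simp [hc]
  rw [pv_group_by (pvEnt map1)
        (fun a => ((pvEnt map2).map (fun y => if pvCanon (a ++ y.1) = k then y.2 else 0)).sum)]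
  congr 1
  apply List.map_congr_left
  intro c _
  simp only [Function.comp_def]
  rw [hTeq c]

theorem pv_prod_keys (X Y : List (String × Int)) :
    (pvProd X Y).map Prod.fst = pvCross (X.map Prod.fst) (Y.map Prod.fst) := by
  unfold pvProd pvCross
  rw [List.map_flatMap, List.flatMap_map]
  have hfun : (fun x : String × Int =>
      (Y.map fun y => (pvCanon (x.1 ++ y.1), x.2 * y.2)).map Prod.fst) =
      ((fun a : String => (Y.map Prod.fst).map (fun b => pvCanon (a ++ b))) ∘ Prod.fst) := by
    funext x
    simp only [Function.comp_def]
    rw [List.map_map, List.map_map]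
    rfl
  rw [hfun]
  simp only [Function.comp_def]

-- ===== VERDICT (by name: the statement is the Claim_ definition above) =====
theorem mapMutipleMap_spec : Claim_equal_mapMutipleMap := by
  intro map1 map2 _
  unfold Spec_mapMutipleMap
  rw [pv_A_as_fold, pv_B_as_fold, pv_LA_eq,
      pv_foldl_upsert_items, pv_foldl_upsert_items]
  have hkeys : PySem.List.dedup ((pvProd (pvEnt map1) (pvEnt map2)).map Prod.fst) =
      PySem.List.dedup ((pvProd (pvGroup map1).items (pvGroup map2).items).map Prod.fst) := by
    rw [pv_prod_keys, pv_prod_keys, pv_group_items, pv_group_items, List.map_map]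
    have h1 : ((PySem.List.dedup ((pvEnt map1).map Prod.fst)).map
        ((Prod.fst : String × Int → String) ∘ (fun c => (c, pvSumAt (pvEnt map1) c)))) =
        PySem.List.dedup ((pvEnt map1).map Prod.fst) := by
      simp [Function.comp_def]
    have h2 : ((PySem.List.dedup ((pvEnt map2).map Prod.fst)).map
        ((Prod.fst : String × Int → String) ∘ (fun c => (c, pvSumAt (pvEnt map2) c)))) =
        PySem.List.dedup ((pvEnt map2).map Prod.fst) := by
      simp [Function.comp_def]
    rw [List.map_map, h1, h2]
    exact pv_keys_eq _ _
  rw [hkeys]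
  apply List.map_congr_left
  intro k _
  rw [pv_pvFold_eq_sumAt, pv_pvFold_eq_sumAt, pv_values_eq]
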